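-- pv_equiv track=rewrite | github.com/nelsonlai/freelance | leetcode/leetcode_problems/codes/1737_change-minimum-characters-to-satisfy-one-of-three-conditions/python3.py | minCharacters
-- ===== SOURCE A (Python) =====
-- from collections import Counter
--
-- def minCharacters(a: str, b: str) -> int:
--     freq_a = Counter(a)
--     freq_b = Counter(b)
--
--     # Condition 3: All characters in a < all in b (or vice versa)
--     result = float('inf')
--
--     # Condition 1: Every char in a < every char in b
--     for c in range(ord('a'), ord('z')):
--         changes = sum(freq_a[chr(i)] for i in range(c + 1, ord('z') + 1))
--         changes += sum(freq_b[chr(i)] for i in range(ord('a'), c + 1))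
--         result = min(result, changes)
--
--     # Condition 2: Every char in b < every char in a
--     for c in range(ord('a'), ord('z')):
--         changes = sum(freq_b[chr(i)] for i in range(c + 1, ord('z') + 1))
--         changes += sum(freq_a[chr(i)] for i in range(ord('a'), c + 1))
--         result = min(result, changes)
--
--     # Condition 3: All same character
--     for c in range(ord('a'), ord('z') + 1):
--         char = chr(c)
--         changes = len(a) - freq_a[char] + len(b) - freq_b[char]
--         result = min(result, changes)
--
--     return result
-- ===== SOURCE B (Python) =====
-- from collections import Counter
--
-- def minCharacters(a: str, b: str) -> int:
--     # Count each lowercase letter once into arrays and take prefix sums, so every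
--     # split point is scored in O(1) instead of re-summing 26 buckets per split.
--     fa = Counter(a)
--     fb = Counter(b)
--     ca = [fa[chr(97 + i)] for i in range(26)]
--     cb = [fb[chr(97 + i)] for i in range(26)]
--     pa = [0]
--     pb = [0]
--     for i in range(26):
--         pa.append(pa[-1] + ca[i])
--         pb.append(pb[-1] + cb[i])
--     one = min(pa[26] - pa[s] + pb[s] for s in range(1, 26))
--     two = min(pb[26] - pb[s] + pa[s] for s in range(1, 26))
--     three = min(len(a) + len(b) - ca[s] - cb[s] for s in range(26))
--     return min(one, two, three)
-- ===== Notes on version B (the rewrite author's own statement) =====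
-- stated objective: alternative
-- what changed: Replaces A's per-split re-summation of 26 Counter buckets (two 25-iteration loops each summing up to 26 lookups) by letter-count arrays with prefix sums, scoring every split point in O(1).
import Mathlib
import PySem

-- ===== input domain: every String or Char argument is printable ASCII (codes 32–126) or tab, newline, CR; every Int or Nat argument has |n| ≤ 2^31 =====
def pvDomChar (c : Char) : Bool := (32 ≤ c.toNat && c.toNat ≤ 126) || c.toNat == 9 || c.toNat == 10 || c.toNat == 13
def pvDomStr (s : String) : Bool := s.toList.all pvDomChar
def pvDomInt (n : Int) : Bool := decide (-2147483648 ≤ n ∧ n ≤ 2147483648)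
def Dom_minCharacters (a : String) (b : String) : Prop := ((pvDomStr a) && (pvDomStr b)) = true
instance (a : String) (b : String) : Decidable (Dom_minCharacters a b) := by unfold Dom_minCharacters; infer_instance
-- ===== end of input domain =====

-- B replaces A's re-summation of the 26 Counter buckets at every split point by
-- letter-count arrays with prefix sums (equivalence of RETURN values; neither mutates).

-- ===== PORT A =====
-- 'result = float('inf'); for c in …: result = min(result, changes)' — the running
-- minimum is modelled as Option Int with none = inf; exact, because every 'changes'
-- is an Int and min(inf, x) = x.
def pyminFold (v : Int → Int) (l : List Int) (r0 : Option Int) : Option Int :=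
  l.foldl (fun r c => some (match r with | none => v c | some m => min m (v c))) r0

def minCharacters (a : String) (b : String) : Int :=
  let freqA := PySem.Dict.counter a.toList
  let freqB := PySem.Dict.counter b.toList
  -- Condition 1
  let r1 := pyminFold (fun c =>
      ((PySem.List.pyRange (c+1) 123 1).map (fun i => freqA.getD (Char.ofNat i.toNat) 0)).sum
      + ((PySem.List.pyRange 97 (c+1) 1).map (fun i => freqB.getD (Char.ofNat i.toNat) 0)).sum)
    (PySem.List.pyRange 97 122 1) none
  -- Condition 2
  let r2 := pyminFold (fun c =>
      ((PySem.List.pyRange (c+1) 123 1).map (fun i => freqB.getD (Char.ofNat i.toNat) 0)).sum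
      + ((PySem.List.pyRange 97 (c+1) 1).map (fun i => freqA.getD (Char.ofNat i.toNat) 0)).sum)
    (PySem.List.pyRange 97 122 1) r1
  -- Condition 3
  let r3 := pyminFold (fun c =>
      PySem.Str.len a - freqA.getD (Char.ofNat c.toNat) 0
        + PySem.Str.len b - freqB.getD (Char.ofNat c.toNat) 0)
    (PySem.List.pyRange 97 123 1) r2
  r3.getD 0   -- the condition-3 loop is nonempty, so r3 is never none

-- ===== PORT B =====
def minCharacters_alt (a : String) (b : String) : Int :=
  let fa := PySem.Dict.counter a.toList
  let fb := PySem.Dict.counter b.toList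
  let ca := (PySem.List.pyRange 0 26 1).map (fun i => fa.getD (Char.ofNat (97 + i).toNat) 0)
  let cb := (PySem.List.pyRange 0 26 1).map (fun i => fb.getD (Char.ofNat (97 + i).toNat) 0)
  let pp := (PySem.List.pyRange 0 26 1).foldl (fun (p : List Int × List Int) i =>
    (p.1 ++ [PySem.List.pyGetD p.1 (-1) 0 + PySem.List.pyGetD ca i 0],
     p.2 ++ [PySem.List.pyGetD p.2 (-1) 0 + PySem.List.pyGetD cb i 0])) ([0], [0])
  let pa := pp.1
  let pb := pp.2
  -- the three generators are nonempty, so each min? is some; .getD 0 unwraps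
  let one := (PySem.List.min? ((PySem.List.pyRange 1 26 1).map (fun s =>
    PySem.List.pyGetD pa 26 0 - PySem.List.pyGetD pa s 0 + PySem.List.pyGetD pb s 0))
    (fun x => x)).getD 0
  let two := (PySem.List.min? ((PySem.List.pyRange 1 26 1).map (fun s =>
    PySem.List.pyGetD pb 26 0 - PySem.List.pyGetD pb s 0 + PySem.List.pyGetD pa s 0))
    (fun x => x)).getD 0
  let three := (PySem.List.min? ((PySem.List.pyRange 0 26 1).map (fun s =>
    PySem.Str.len a + PySem.Str.len b - PySem.List.pyGetD ca s 0 - PySem.List.pyGetD cb s 0))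
    (fun x => x)).getD 0
  min (min one two) three

-- ===== PRECONDITION & SPEC =====
def Spec_minCharacters (a : String) (b : String) (out : Int) : Prop := out = minCharacters_alt a b
instance (a : String) (b : String) (out : Int) : Decidable (Spec_minCharacters a b out) := by unfold Spec_minCharacters; infer_instance

-- ===== CLAIM (what is proved, stated in full; the proofs are below) =====
def Claim_equal_minCharacters : Prop := ∀ (a : String) (b : String), Dom_minCharacters a b → Spec_minCharacters a b (minCharacters a b)

-- ===== LEMMAS AND PROOFS =====

-- count of the letter with code point i
def cnt (t : List Char) (i : Int) : Int := (t.count (Char.ofNat i.toNat) : Int)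

-- sum of letter counts over the code-point range [lo, hi)
def rsum (t : List Char) (lo hi : Int) : Int :=
  ((PySem.List.pyRange lo hi 1).map (fun i => cnt t i)).sum

-- running minimum over a list of candidate indices
def mfold (v : Int → Int) (l : List Int) (x : Int) : Int :=
  l.foldl (fun m c => min m (v c)) x

theorem mfold_cons (v : Int → Int) (c : Int) (l : List Int) (x : Int) :
    mfold v (c :: l) x = mfold v l (min x (v c)) := rfl

theorem pyminFold_some (v : Int → Int) (l : List Int) (x : Int) :
    pyminFold v l (some x) = some (mfold v l x) := by
  induction l generalizing x with
  | nil => rfl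
  | cons c t ih => simpa [pyminFold, mfold] using ih (min x (v c))

theorem pyminFold_cons_none (v : Int → Int) (c : Int) (l : List Int) :
    pyminFold v (c :: l) none = some (mfold v l (v c)) := by
  simpa [pyminFold] using pyminFold_some v l (v c)

theorem mfold_min_init (v : Int → Int) (l : List Int) (p q : Int) :
    mfold v l (min p q) = min p (mfold v l q) := by
  induction l generalizing q with
  | nil => rfl
  | cons c t ih => simpa [mfold, min_assoc] using ih (min q (v c))

theorem mfold_map (v : Int → Int) (f : Int → Int) (l : List Int) (x : Int) :
    mfold v (l.map f) x = mfold (fun s => v (f s)) l x := by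
  simp [mfold, List.foldl_map]

theorem mfold_congr (v w : Int → Int) (l : List Int) (x y : Int) (hx : x = y)
    (h : ∀ c ∈ l, v c = w c) : mfold v l x = mfold w l y := by
  subst hx
  unfold mfold
  exact PySem.List.foldl_congr_mem l (fun m c => min m (v c)) (fun m c => min m (w c)) x
    (fun acc c hc => by simp only [h c hc])

theorem pyRange_shift (lo hi k : Int) :
    PySem.List.pyRange (lo + k) (hi + k) 1 = (PySem.List.pyRange lo hi 1).map (· + k) := by
  rw [PySem.List.pyRange_one, PySem.List.pyRange_one, List.map_map]
  have : hi + k - (lo + k) = hi - lo := by ring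
  rw [this]
  exact List.map_congr_left (fun n _ => by simp; ring)

theorem rsum_split (t : List Char) (lo mid hi : Int) (h1 : lo ≤ mid) (h2 : mid ≤ hi) :
    rsum t lo hi = rsum t lo mid + rsum t mid hi := by
  rw [rsum, PySem.List.pyRange_one_append lo mid hi h1 h2, List.map_append, List.sum_append]
  rfl

theorem sum_map_range_succ (h : Int → Int) (n : Nat) :
    ((PySem.List.pyRange 0 ((n : Int) + 1) 1).map h).sum
      = ((PySem.List.pyRange 0 (n : Int) 1).map h).sum + h n := by
  rw [PySem.List.pyRange_one_succ_right (by positivity), List.map_append]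
  simp

theorem prefix_fold (h : Int → Int) (n : Nat) :
    (PySem.List.pyRange 0 (n : Int) 1).foldl
        (fun p i => p ++ [PySem.List.pyGetD p (-1) 0 + h i]) [0]
      = (PySem.List.pyRange 0 ((n : Int) + 1) 1).map
          (fun k => ((PySem.List.pyRange 0 k 1).map h).sum) := by
  induction n with
  | zero =>
    simp [show PySem.List.pyRange 0 0 1 = [] from rfl, show PySem.List.pyRange 0 1 1 = [0] from rfl]
  | succ n ih =>
    have hc : ((n + 1 : Nat) : Int) = (n : Int) + 1 := by push_cast; ring
    have h0n : (0:Int) ≤ (n:Int) := by positivity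
    have h0n1 : (0:Int) ≤ (n:Int) + 1 := by positivity
    rw [hc, PySem.List.pyRange_one_succ_right h0n, List.foldl_append, ih]
    rw [PySem.List.pyRange_one_succ_right h0n1, List.map_append]
    simp only [List.foldl_cons, List.foldl_nil, List.map_cons, List.map_nil]
    congr 1
    rw [show (List.map (fun k => ((PySem.List.pyRange 0 k 1).map h).sum)
          (PySem.List.pyRange 0 ((n:Int)+1) 1))
        = (List.map (fun k => ((PySem.List.pyRange 0 k 1).map h).sum)
            (PySem.List.pyRange 0 (n:Int) 1)) ++ [((PySem.List.pyRange 0 (n:Int) 1).map h).sum]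
      from by rw [PySem.List.pyRange_one_succ_right h0n, List.map_append]; rfl]
    rw [PySem.List.pyGetD_neg_one_append_singleton, sum_map_range_succ]


theorem mfold_of_min_map (g : Int → Int) (l : List Int) (x : Int) :
    (l.map g).foldl min x = mfold g l x := by
  simp [mfold, List.foldl_map]

theorem rsum_shift (t : List Char) (k : Int) :
    rsum t 97 (97 + k) = ((PySem.List.pyRange 0 k 1).map (fun i => cnt t (97 + i))).sum := by
  have hsh : PySem.List.pyRange 97 (97 + k) 1 = (PySem.List.pyRange 0 k 1).map (· + 97) := by
    have h := pyRange_shift 0 k 97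
    rw [show (0:Int) + 97 = (97:Int) by norm_num, show k + 97 = 97 + k by ring] at h
    exact h
  rw [rsum, hsh, List.map_map]
  congr 1
  exact List.map_congr_left (fun i _ => by simp only [Function.comp_apply]; rw [show i + 97 = 97 + i by ring])


theorem pairfold_eq (ca cb : List Int) (l : List Int) :
    l.foldl (fun (p : List Int × List Int) i =>
        (p.1 ++ [PySem.List.pyGetD p.1 (-1) 0 + PySem.List.pyGetD ca i 0],
         p.2 ++ [PySem.List.pyGetD p.2 (-1) 0 + PySem.List.pyGetD cb i 0])) ([0], [0])
      = (l.foldl (fun p i => p ++ [PySem.List.pyGetD p (-1) 0 + PySem.List.pyGetD ca i 0]) [0],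
         l.foldl (fun p i => p ++ [PySem.List.pyGetD p (-1) 0 + PySem.List.pyGetD cb i 0]) [0]) := by
  rw [PySem.List.foldl_prod_mk
    (f := fun p i => p ++ [PySem.List.pyGetD p (-1) 0 + PySem.List.pyGetD ca i 0])
    (g := fun p i => p ++ [PySem.List.pyGetD p (-1) 0 + PySem.List.pyGetD cb i 0])]


-- proof-side name for B's letter-count list
def caList (t : List Char) : List Int :=
  (PySem.List.pyRange 0 26 1).map (fun i =>
    (PySem.Dict.counter t).getD (Char.ofNat (97 + i).toNat) 0)

theorem caList_getD (t : List Char) (i : Int) (h1 : 0 ≤ i) (h2 : i < 26) :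
    PySem.List.pyGetD (caList t) i 0 = cnt t (97 + i) := by
  rw [caList, PySem.List.pyGetD_map_pyRange_of_nonneg _ _ _ _ h1 h2, PySem.Dict.getD_counter]
  rfl

theorem prefix_getD (t : List Char) (s : Int) (h1 : 0 ≤ s) (h2 : s ≤ 26) :
    PySem.List.pyGetD ((PySem.List.pyRange 0 27 1).map
        (fun k => ((PySem.List.pyRange 0 k 1).map (fun i => PySem.List.pyGetD (caList t) i 0)).sum))
      s 0 = rsum t 97 (97 + s) := by
  rw [PySem.List.pyGetD_map_pyRange_of_nonneg _ _ _ _ h1 (by omega), rsum_shift]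
  congr 1
  refine List.map_congr_left (fun i hi => ?_)
  have hb := PySem.List.mem_pyRange_one.mp hi
  exact caList_getD t i hb.1 (by omega)

set_option maxHeartbeats 4000000 in
set_option maxRecDepth 40000 in
theorem minCharacters_agree (a b : String) : minCharacters a b = minCharacters_alt a b := by
  have hA : minCharacters a b =
      min (min
        (mfold (fun c => rsum a.toList (c+1) 123 + rsum b.toList 97 (c+1))
          (PySem.List.pyRange 98 122 1)
          (rsum a.toList (97+1) 123 + rsum b.toList 97 (97+1)))
        (mfold (fun c => rsum b.toList (c+1) 123 + rsum a.toList 97 (c+1))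
          (PySem.List.pyRange 98 122 1)
          (rsum b.toList (97+1) 123 + rsum a.toList 97 (97+1))))
        (mfold (fun c => PySem.Str.len a - cnt a.toList c + PySem.Str.len b - cnt b.toList c)
          (PySem.List.pyRange 98 123 1)
          (PySem.Str.len a - cnt a.toList 97 + PySem.Str.len b - cnt b.toList 97)) := by
    simp only [minCharacters, PySem.Dict.getD_counter, rsum, cnt]
    rw [show PySem.List.pyRange 97 122 1 = 97 :: PySem.List.pyRange 98 122 1 from rfl,
        show PySem.List.pyRange 97 123 1 = 97 :: PySem.List.pyRange 98 123 1 from rfl]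
    rw [pyminFold_cons_none, pyminFold_some, pyminFold_some, Option.getD_some]
    rw [mfold_cons, mfold_min_init, mfold_cons, mfold_min_init]
  rw [hA]
  simp only [minCharacters_alt]
  rw [pairfold_eq]
  simp only []
  have hpf : ∀ (h : Int → Int),
      (PySem.List.pyRange 0 26 1).foldl
          (fun p i => p ++ [PySem.List.pyGetD p (-1) 0 + h i]) [0]
        = (PySem.List.pyRange 0 27 1).map
            (fun k => ((PySem.List.pyRange 0 k 1).map h).sum) := by
    intro h
    have h26 := prefix_fold h 26
    norm_num at h26
    exact h26
  rw [show (PySem.List.pyRange 0 26 1).map (fun i =>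
        (PySem.Dict.counter a.toList).getD (Char.ofNat (97 + i).toNat) 0)
      = caList a.toList from rfl,
      show (PySem.List.pyRange 0 26 1).map (fun i =>
        (PySem.Dict.counter b.toList).getD (Char.ofNat (97 + i).toNat) 0)
      = caList b.toList from rfl]
  rw [hpf, hpf]
  have hmin1 : ∀ (g : Int → Int),
      (PySem.List.min? ((PySem.List.pyRange 1 26 1).map g) (fun x => x)).getD 0
        = mfold g (PySem.List.pyRange 2 26 1) (g 1) := by
    intro g
    rw [show PySem.List.pyRange 1 26 1 = 1 :: PySem.List.pyRange 2 26 1 from rfl, List.map_cons,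
        PySem.List.min?_id_cons, Option.getD_some, mfold_of_min_map]
  have hmin0 : ∀ (g : Int → Int),
      (PySem.List.min? ((PySem.List.pyRange 0 26 1).map g) (fun x => x)).getD 0
        = mfold g (PySem.List.pyRange 1 26 1) (g 0) := by
    intro g
    rw [show PySem.List.pyRange 0 26 1 = 0 :: PySem.List.pyRange 1 26 1 from rfl, List.map_cons,
        PySem.List.min?_id_cons, Option.getD_some, mfold_of_min_map]
  rw [hmin1, hmin1, hmin0]
  have e96 : PySem.List.pyRange 98 122 1 = (PySem.List.pyRange 2 26 1).map (· + 96) := by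
    have h := pyRange_shift 2 26 96; norm_num at h; exact h
  have e97 : PySem.List.pyRange 98 123 1 = (PySem.List.pyRange 1 26 1).map (· + 97) := by
    have h := pyRange_shift 1 26 97; norm_num at h; exact h
  rw [e96, e97]
  simp only [mfold_map]
  refine congrArg₂ min (congrArg₂ min ?_ ?_) ?_
  · refine mfold_congr _ _ _ _ _ ?_ ?_
    · rw [prefix_getD a.toList 26 (by norm_num) (by norm_num),
          prefix_getD a.toList 1 (by norm_num) (by norm_num),
          prefix_getD b.toList 1 (by norm_num) (by norm_num),
          show (97:Int) + 26 = 123 by norm_num]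
      linarith [rsum_split a.toList 97 (97+1) 123 (by omega) (by omega)]
    · intro s hs
      have hb := PySem.List.mem_pyRange_one.mp hs
      rw [prefix_getD a.toList 26 (by norm_num) (by norm_num),
          prefix_getD a.toList s (by omega) (by omega),
          prefix_getD b.toList s (by omega) (by omega),
          show (97:Int) + 26 = 123 by norm_num,
          show s + 96 + 1 = 97 + s by ring]
      linarith [rsum_split a.toList 97 (97+s) 123 (by omega) (by omega)]
  · refine mfold_congr _ _ _ _ _ ?_ ?_
    · rw [prefix_getD b.toList 26 (by norm_num) (by norm_num),
          prefix_getD b.toList 1 (by norm_num) (by norm_num),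
          prefix_getD a.toList 1 (by norm_num) (by norm_num),
          show (97:Int) + 26 = 123 by norm_num]
      linarith [rsum_split b.toList 97 (97+1) 123 (by omega) (by omega)]
    · intro s hs
      have hb := PySem.List.mem_pyRange_one.mp hs
      rw [prefix_getD b.toList 26 (by norm_num) (by norm_num),
          prefix_getD b.toList s (by omega) (by omega),
          prefix_getD a.toList s (by omega) (by omega),
          show (97:Int) + 26 = 123 by norm_num,
          show s + 96 + 1 = 97 + s by ring]
      linarith [rsum_split b.toList 97 (97+s) 123 (by omega) (by omega)]
  · refine mfold_congr _ _ _ _ _ ?_ ?_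
    · rw [caList_getD a.toList 0 (by norm_num) (by norm_num),
          caList_getD b.toList 0 (by norm_num) (by norm_num),
          show (97:Int) + 0 = 97 by norm_num]
      ring
    · intro s hs
      have hb := PySem.List.mem_pyRange_one.mp hs
      rw [caList_getD a.toList s (by omega) (by omega),
          caList_getD b.toList s (by omega) (by omega),
          show s + 97 = 97 + s by ring]
      ring

-- ===== VERDICT (by name: the statement is the Claim_ definition above) =====
theorem minCharacters_spec : Claim_equal_minCharacters := by
  intro a b _
  exact minCharacters_agree a b
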